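-- pv_equiv track=rewrite | github.com/tuxovdmtr/Projector-Python-Beginner | Lesson 9 Complexity. Algorithms/HWs/Lesson 9 HW.py | get_cats_with_hats
-- ===== SOURCE A (Python) =====
-- def get_cats_with_hats(rounds: int, cats: int):
--     cats_list = [True] * cats
--     cats_with_hats = []
--     while rounds > 0:
--         for round in range(2, rounds + 1):
--             for cat in range(round, len(cats_list)+1, round):
--                 if cat % round == 0:
--                     cats_list[cat-1] = not cats_list[cat-1]
--             else:
--                 rounds -= 1
--         break
--     for cat_pos, status in enumerate(cats_list):
--         if status == True:
--             cats_with_hats.append(cat_pos + 1)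
--     return cats_with_hats
-- ===== SOURCE B (Python) =====
-- def get_cats_with_hats(rounds, cats):
--     return [cat for cat in range(1, cats + 1)
--             if sum(1 for d in range(2, rounds + 1) if cat % d == 0) % 2 == 0]
-- ===== Notes on version B (the rewrite author's own statement) =====
-- stated objective: simpler
-- what changed: Replaced A's mutable boolean toggle array driven by a multiples-stepping sieve (plus dead while/for-else scaffolding) with a single comprehension that keeps each cat whose divisor count in [2, rounds] is even.
import Mathlib
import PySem

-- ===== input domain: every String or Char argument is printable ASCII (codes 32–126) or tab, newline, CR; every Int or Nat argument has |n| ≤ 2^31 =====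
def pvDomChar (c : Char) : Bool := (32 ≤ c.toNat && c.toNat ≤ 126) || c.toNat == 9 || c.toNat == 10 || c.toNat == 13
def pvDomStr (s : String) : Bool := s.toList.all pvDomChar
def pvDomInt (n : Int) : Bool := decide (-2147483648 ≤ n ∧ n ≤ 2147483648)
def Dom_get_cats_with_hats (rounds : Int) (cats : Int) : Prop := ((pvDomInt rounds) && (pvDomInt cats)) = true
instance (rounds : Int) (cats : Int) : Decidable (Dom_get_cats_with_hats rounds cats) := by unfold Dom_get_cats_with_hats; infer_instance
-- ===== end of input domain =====

-- B replaces A's boolean toggle array + multiples-stepping sieve with a direct per-cat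
-- even-divisor-count test (objective: simpler). Both are total; return values proved equal everywhere.

-- ===== PORT A =====
-- inner 'for cat in range(round, len(cats_list)+1, round)' body; the index cat-1 is always in range there
def pvSieveRound (l : List Bool) (r : Int) : List Bool :=
  (PySem.List.pyRange r ((l.length : Int) + 1) r).foldl
    (fun l cat =>
      if PySem.Int.mod cat r == 0 then
        l.set (cat - 1).toNat (!(l.getD (cat - 1).toNat true))
      else l) l

def get_cats_with_hats (rounds : Int) (cats : Int) : List Int :=
  -- cats_list = [True] * cats
  let cats_list : List Bool := List.replicate cats.toNat true
  -- 'while rounds > 0: for round in range(2, rounds+1): … ; break' runs the for loop once iff rounds > 0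
  -- (the for-else 'rounds -= 1' only rewrites the already-tested counter)
  let cats_list :=
    if rounds > 0 then (PySem.List.pyRange 2 (rounds + 1) 1).foldl pvSieveRound cats_list
    else cats_list
  -- for cat_pos, status in enumerate(cats_list): if status == True: append(cat_pos + 1)
  (PySem.List.enumerate cats_list).foldl
    (fun acc p => if p.2 == true then acc ++ [p.1 + 1] else acc) []

-- ===== PORT B =====
def get_cats_with_hats_alt (rounds : Int) (cats : Int) : List Int :=
  (PySem.List.pyRange 1 (cats + 1) 1).filter
    (fun cat =>
      PySem.Int.mod
        (((PySem.List.pyRange 2 (rounds + 1) 1).filter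
            (fun d => PySem.Int.mod cat d == 0)).map (fun _ => (1 : Int))).sum 2 == 0)

-- ===== PRECONDITION & SPEC =====
def Spec_get_cats_with_hats (rounds : Int) (cats : Int) (out : List Int) : Prop := out = get_cats_with_hats_alt rounds cats
instance (rounds : Int) (cats : Int) (out : List Int) : Decidable (Spec_get_cats_with_hats rounds cats out) := by unfold Spec_get_cats_with_hats; infer_instance

-- ===== CLAIM (what is proved, stated in full; the proofs are below) =====
def Claim_equal_get_cats_with_hats : Prop := ∀ (rounds : Int) (cats : Int), Dom_get_cats_with_hats rounds cats → Spec_get_cats_with_hats rounds cats (get_cats_with_hats rounds cats)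

-- ===== LEMMAS AND PROOFS =====

-- the raw toggle step, without the always-true '% round == 0' guard
def pvToggle (l : List Bool) (cat : Int) : List Bool :=
  l.set (cat - 1).toNat (!(l.getD (cat - 1).toNat true))

theorem pvToggle_length (l : List Bool) (cat : Int) : (pvToggle l cat).length = l.length := by
  simp [pvToggle]

theorem pvFoldToggle_getElem? (js : List Int) (l : List Bool) (i : Nat)
    (hnd : js.Nodup) (hbd : ∀ c ∈ js, 1 ≤ c ∧ c ≤ (l.length : Int)) (hi : i < l.length) :
    (js.foldl pvToggle l)[i]? =
      some (if ((i : Int) + 1) ∈ js then !(l[i]) else l[i]) := by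
  induction js generalizing l with
  | nil => simp [List.getElem?_eq_getElem hi]
  | cons c js ih =>
    rcases List.nodup_cons.mp hnd with ⟨hcn, hnd'⟩
    have hc := hbd c (List.mem_cons_self)
    have hidx : (c - 1).toNat < l.length := by omega
    have hl' : (pvToggle l c).length = l.length := pvToggle_length l c
    have hbd' : ∀ x ∈ js, 1 ≤ x ∧ x ≤ ((pvToggle l c).length : Int) := by
      intro x hx; rw [hl']; exact hbd x (List.mem_cons_of_mem _ hx)
    rw [List.foldl_cons, ih (pvToggle l c) hnd' hbd' (by rw [hl']; exact hi)]
    by_cases hic : (i : Int) + 1 = c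
    · have hii : (c - 1).toNat = i := by omega
      have hnm : ¬ ((i : Int) + 1) ∈ js := by rw [hic]; exact hcn
      have : (pvToggle l c)[i] = !(l[i]) := by
        simp [pvToggle, hii, List.getElem_set_self,
          List.getD_eq_getElem?_getD, List.getElem?_eq_getElem hi]
      rw [this]
      simp [hic, hcn]
    · have hne : (c - 1).toNat ≠ i := by omega
      have : (pvToggle l c)[i]'(by rw [hl']; exact hi) = l[i] := by
        unfold pvToggle
        exact List.getElem_set_ne (by omega) _
      rw [this]
      have : (((i : Int) + 1) ∈ c :: js) ↔ (((i : Int) + 1) ∈ js) := by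
        simp [List.mem_cons, hic]
      rw [if_congr this rfl rfl]

theorem pvSieveRound_eq_foldToggle (l : List Bool) (r : Int) (hr : 0 < r) :
    pvSieveRound l r = (PySem.List.pyRange r ((l.length : Int) + 1) r).foldl pvToggle l := by
  unfold pvSieveRound
  refine PySem.List.foldl_congr_mem _ _ _ _ (fun acc cat hc => ?_)
  have hd : r ∣ cat := by
    rcases (PySem.List.mem_pyRange_iff_of_pos hr cat).mp hc with ⟨h1, _, h3⟩
    exact dvd_sub_self_right.mp h3
  simp [pvToggle, (PySem.Int.mod_eq_zero_iff_dvd cat r).mpr hd]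

theorem pvMem_mult_range (l : List Bool) (r : Int) (hr : 0 < r) (i : Nat) (hi : i < l.length) :
    (((i : Int) + 1) ∈ PySem.List.pyRange r ((l.length : Int) + 1) r) ↔ r ∣ ((i : Int) + 1) := by
  rw [PySem.List.mem_pyRange_iff_of_pos hr]
  constructor
  · rintro ⟨-, -, h3⟩
    exact dvd_sub_self_right.mp h3
  · intro hd
    refine ⟨Int.le_of_dvd (by omega) hd, by omega, ?_⟩
    exact dvd_sub_self_right.mpr hd

theorem pvNodup_mult_range (a b s : Int) (hs : 0 < s) :
    (PySem.List.pyRange a b s).Nodup := by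
  rw [PySem.List.pyRange_of_pos a b hs]
  refine List.Nodup.map ?_ (List.nodup_range)
  intro x y hxy
  have h1 : s * (x : Int) = s * (y : Int) := by
    have := add_left_cancel hxy
    exact this
  have h2 := mul_left_cancel₀ (by omega : s ≠ 0) h1
  exact_mod_cast h2

theorem pvSieveRound_length (l : List Bool) (r : Int) : (pvSieveRound l r).length = l.length := by
  unfold pvSieveRound
  generalize PySem.List.pyRange r ((l.length : Int) + 1) r = js
  induction js generalizing l with
  | nil => rfl
  | cons c js ih => simp only [List.foldl_cons]; rw [ih]; split <;> simp

theorem pvSieveRound_getElem? (l : List Bool) (r : Int) (hr : 0 < r) (i : Nat) (hi : i < l.length) :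
    (pvSieveRound l r)[i]? = some (if r ∣ ((i : Int) + 1) then !(l[i]) else l[i]) := by
  rw [pvSieveRound_eq_foldToggle l r hr,
    pvFoldToggle_getElem? _ l i (pvNodup_mult_range _ _ _ hr) ?_ hi,
    if_congr (pvMem_mult_range l r hr i hi) rfl rfl]
  intro c hc
  rcases (PySem.List.mem_pyRange_iff_of_pos hr c).mp hc with ⟨h1, h2, -⟩
  omega

theorem pvSieveFold_getElem? (rs : List Int) (l : List Bool) (i : Nat)
    (hrs : ∀ r ∈ rs, 0 < r) (hi : i < l.length) :
    (rs.foldl pvSieveRound l)[i]? =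
      some (if (rs.countP (fun r => decide (r ∣ ((i : Int) + 1)))) % 2 = 0 then l[i] else !(l[i])) := by
  induction rs generalizing l with
  | nil => simp [List.getElem?_eq_getElem hi]
  | cons r rs ih =>
    have hr := hrs r (List.mem_cons_self)
    have hl' := pvSieveRound_length l r
    rw [List.foldl_cons, ih (pvSieveRound l r) (fun x hx => hrs x (List.mem_cons_of_mem _ hx))
      (by rw [hl']; exact hi)]
    have hg : (pvSieveRound l r)[i]'(by rw [hl']; exact hi)
        = if r ∣ ((i : Int) + 1) then !(l[i]) else l[i] := by
      have := pvSieveRound_getElem? l r hr i hi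
      rwa [List.getElem?_eq_getElem (by rw [hl']; exact hi), Option.some_inj] at this
    rw [hg, List.countP_cons]
    generalize rs.countP (fun r => decide (r ∣ ((i : Int) + 1))) = k
    by_cases hd : r ∣ ((i : Int) + 1)
    · simp only [hd, decide_true, if_true]
      rcases Nat.mod_two_eq_zero_or_one k with h | h
      · have h1 : (k + 1) % 2 = 1 := by omega
        simp [h, h1]
      · have h1 : (k + 1) % 2 = 0 := by omega
        simp [h, h1]
    · simp [hd]

-- the status of cat i+1 after the whole sieve, starting from all-True
theorem pvFinal_getElem? (rounds : Int) (n : Nat) (i : Nat) (hi : i < n) :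
    ((PySem.List.pyRange 2 (rounds + 1) 1).foldl pvSieveRound (List.replicate n true))[i]? =
      some (decide (((PySem.List.pyRange 2 (rounds + 1) 1).countP
        (fun r => decide (r ∣ ((i : Int) + 1)))) % 2 = 0)) := by
  rw [pvSieveFold_getElem? _ _ i
    (fun r hr => by have := (PySem.List.mem_pyRange_one).mp hr; omega)
    (by simpa using hi)]
  congr 1
  split <;> simp_all

theorem pvSieveFold_length (rs : List Int) (l : List Bool) :
    (rs.foldl pvSieveRound l).length = l.length := by
  induction rs generalizing l with
  | nil => rfl
  | cons r rs ih => rw [List.foldl_cons, ih, pvSieveRound_length]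

-- for each index k < n, A's final status test equals B's even-divisor-count test for cat = 1 + k
theorem pvPointwise (rounds : Int) (n : Nat) (k : Nat) (hk : k < n) :
    (PySem.List.pyGetD ((PySem.List.pyRange 2 (rounds + 1) 1).foldl pvSieveRound (List.replicate n true)) ((0 : Int) + (k : Int)) false == true)
    = (PySem.Int.mod (((PySem.List.pyRange 2 (rounds + 1) 1).filter
          (fun d => PySem.Int.mod ((1 : Int) + (k : Int)) d == 0)).map (fun _ => (1 : Int))).sum 2 == 0) := by
  rw [zero_add, PySem.List.pyGetD_natCast, List.getD_eq_getElem?_getD,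
    pvFinal_getElem? rounds n k hk, PySem.List.sum_map_const_int, mul_one, Option.getD_some,
    ← List.countP_eq_length_filter]
  have hpred : (PySem.List.pyRange 2 (rounds + 1) 1).countP (fun d => PySem.Int.mod ((1 : Int) + (k : Int)) d == 0)
      = (PySem.List.pyRange 2 (rounds + 1) 1).countP (fun r => decide (r ∣ ((k : Int) + 1))) := by
    refine List.countP_congr (fun a _ => ?_)
    simp [PySem.Int.mod_eq_zero_iff_dvd, add_comm]
  rw [hpred]
  generalize (PySem.List.pyRange 2 (rounds + 1) 1).countP (fun r => decide (r ∣ ((k : Int) + 1))) = m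
  rw [PySem.Int.mod_eq_emod_of_pos (by norm_num : (0:Int) < 2)]
  rcases Nat.mod_two_eq_zero_or_one m with h | h
  · have h2 : ((m : Int) % 2) = 0 := by omega
    simp [h, h2]
  · have h2 : ¬ (((m : Int) % 2) = 0) := by omega
    simp [h, h2]

-- ===== VERDICT (by name: the statement is the Claim_ definition above) =====
theorem get_cats_with_hats_spec : Claim_equal_get_cats_with_hats := by
  intro rounds cats _
  unfold Spec_get_cats_with_hats get_cats_with_hats get_cats_with_hats_alt
  dsimp only
  have hif : (if rounds > 0 then
        (PySem.List.pyRange 2 (rounds + 1) 1).foldl pvSieveRound (List.replicate cats.toNat true)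
      else (List.replicate cats.toNat true))
      = (PySem.List.pyRange 2 (rounds + 1) 1).foldl pvSieveRound (List.replicate cats.toNat true) := by
    split
    · rfl
    · rw [PySem.List.pyRange_one_eq_nil (by omega)]; rfl
  rw [hif]
  rw [PySem.List.foldl_append_if (fun p : Int × Bool => p.2 == true) (fun p : Int × Bool => p.1 + 1),
      PySem.List.enumerate_eq_map_pyRange _ false,
      List.filter_map, List.map_map, List.nil_append,
      PySem.List.pyRange_one 0, PySem.List.pyRange_one 1,
      List.filter_map, List.filter_map, List.map_map]
  have hlen : (PySem.List.len ((PySem.List.pyRange 2 (rounds + 1) 1).foldl pvSieveRound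
      (List.replicate cats.toNat true)) - 0).toNat = cats.toNat := by
    rw [PySem.List.len_eq, pvSieveFold_length, List.length_replicate]
    omega
  have hlen2 : (cats + 1 - 1).toNat = cats.toNat := by omega
  rw [hlen, hlen2]
  have hfilt : ∀ k ∈ List.range cats.toNat,
      ((((fun p : Int × Bool => p.2 == true) ∘ fun j =>
          (j, PySem.List.pyGetD ((PySem.List.pyRange 2 (rounds + 1) 1).foldl pvSieveRound
            (List.replicate cats.toNat true)) j false)) ∘ fun k : Nat => (0 : Int) + ↑k) k)
      = (((fun cat : Int => PySem.Int.mod (((PySem.List.pyRange 2 (rounds + 1) 1).filter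
            (fun d => PySem.Int.mod cat d == 0)).map (fun _ => (1 : Int))).sum 2 == 0)
          ∘ fun k : Nat => (1 : Int) + ↑k) k) := by
    intro k hk
    simpa [Function.comp] using pvPointwise rounds cats.toNat k (List.mem_range.mp hk)
  rw [List.filter_congr hfilt]
  refine List.map_congr_left (fun k hk => ?_)
  simp only [Function.comp_apply]
  omega
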